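-- pv_equiv track=rewrite | github.com/XavierCooney/advent-of-code | framework.py | make_symmetric_assignment
-- ===== SOURCE A (Python) =====
-- def make_symmetric_assignment(num_slots, n):
--     # i have no idea whether this is actually a thing
--     # and i can't describe it well, but i've come come up with
--     # solutions which use this kind of idea a couple of times.
--     # fills slots with labels 0 to n (incl, excl), but there's
--     # symmetry
--     all_possibilities = [(0, [])]
--     for slot in range(num_slots):
--         next_round = []
--         for next_max, current_vals in all_possibilities:
--             next_next_max = next_max if next_max == n - 1 else next_max + 1
--             for next_val in range(1 + next_max):
--                 next_round.append((
--                     next_next_max if next_val == next_max else next_max,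
--                     current_vals + [next_val]
--                 ))
--         all_possibilities = next_round
--     return all_possibilities
-- ===== SOURCE B (Python) =====
-- def make_symmetric_assignment(num_slots, n):
--     def dfs(remaining, cur_max, vals):
--         if remaining <= 0:
--             return [(cur_max, vals)]
--         out = []
--         for next_val in range(1 + cur_max):
--             if next_val == cur_max:
--                 new_max = cur_max if cur_max == n - 1 else cur_max + 1
--             else:
--                 new_max = cur_max
--             out.extend(dfs(remaining - 1, new_max, vals + [next_val]))
--         return out
--     return dfs(num_slots, 0, [])
-- ===== Notes on version B (the rewrite author's own statement) =====
-- stated objective: alternative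
-- what changed: Replaced the iterative breadth-first frontier (rebuilding the whole list of partial assignments once per slot) by a recursive depth-first backtracking helper that extends one prefix at a time and concatenates subtree results in child order.
import Mathlib
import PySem

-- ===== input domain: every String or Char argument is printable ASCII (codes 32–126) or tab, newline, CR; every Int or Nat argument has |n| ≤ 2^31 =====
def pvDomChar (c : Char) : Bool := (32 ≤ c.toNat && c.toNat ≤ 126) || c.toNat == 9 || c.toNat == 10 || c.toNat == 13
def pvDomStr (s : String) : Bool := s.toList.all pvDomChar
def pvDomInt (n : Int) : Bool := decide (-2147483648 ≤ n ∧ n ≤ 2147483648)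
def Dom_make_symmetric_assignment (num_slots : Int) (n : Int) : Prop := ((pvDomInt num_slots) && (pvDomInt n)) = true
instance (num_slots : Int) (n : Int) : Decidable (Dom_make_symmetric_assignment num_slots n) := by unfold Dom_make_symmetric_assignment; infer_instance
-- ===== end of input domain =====

-- B replaces A's per-slot breadth-first frontier rebuild by recursive depth-first
-- backtracking over prefixes (alternative decomposition, same output order).


-- ===== PORT A =====
def make_symmetric_assignment (num_slots : Int) (n : Int) : List (Int × List Int) :=
  (PySem.List.pyRange 0 num_slots 1).foldl
    (fun all_possibilities _slot =>
      all_possibilities.foldl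
        (fun next_round p =>
          let next_max := p.1
          let current_vals := p.2
          let next_next_max := if next_max == n - 1 then next_max else next_max + 1
          (PySem.List.pyRange 0 (1 + next_max) 1).foldl
            (fun nr next_val =>
              nr ++ [(if next_val == next_max then next_next_max else next_max,
                      current_vals ++ [next_val])])
            next_round)
        [])
    [(0, [])]

-- ===== PORT B =====
def msaDfs (n : Int) (remaining : Int) (cur_max : Int) (vals : List Int) :
    List (Int × List Int) :=
  if remaining ≤ 0 then [(cur_max, vals)]
  else
    (PySem.List.pyRange 0 (1 + cur_max) 1).flatMap
      (fun next_val =>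
        msaDfs n (remaining - 1)
          (if next_val == cur_max then
            (if cur_max == n - 1 then cur_max else cur_max + 1)
          else cur_max)
          (vals ++ [next_val]))
termination_by remaining.toNat
decreasing_by omega

def make_symmetric_assignment_alt (num_slots : Int) (n : Int) : List (Int × List Int) :=
  msaDfs n num_slots 0 []

-- ===== PRECONDITION & SPEC =====
def Spec_make_symmetric_assignment (num_slots : Int) (n : Int) (out : List (Int × List Int)) : Prop := out = make_symmetric_assignment_alt num_slots n
instance (num_slots : Int) (n : Int) (out : List (Int × List Int)) : Decidable (Spec_make_symmetric_assignment num_slots n out) := by unfold Spec_make_symmetric_assignment; infer_instance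

-- ===== CLAIM (what is proved, stated in full; the proofs are below) =====
def Claim_equal_make_symmetric_assignment : Prop := ∀ (num_slots : Int) (n : Int), Dom_make_symmetric_assignment num_slots n → Spec_make_symmetric_assignment num_slots n (make_symmetric_assignment num_slots n)

-- ===== LEMMAS AND PROOFS =====

-- the children of one partial assignment, as A's inner loop produces them
def msaChild (n : Int) (p : Int × List Int) : List (Int × List Int) :=
  (PySem.List.pyRange 0 (1 + p.1) 1).map
    (fun next_val =>
      (if next_val == p.1 then (if p.1 == n - 1 then p.1 else p.1 + 1) else p.1,
       p.2 ++ [next_val]))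

-- an append-one-at-a-time foldl is init ++ map
theorem msa_foldl_append {α : Type} (f : Int → α) :
    ∀ (l : List Int) (init : List α),
      l.foldl (fun acc x => acc ++ [f x]) init = init ++ l.map f := by
  intro l
  induction l with
  | nil => intro init; simp
  | cons x xs ih => intro init; simp [List.foldl_cons, ih]

-- A's middle loop over the frontier = flatMap of the child list
theorem msa_inner_eq (n : Int) :
    ∀ (L : List (Int × List Int)) (init : List (Int × List Int)),
      L.foldl
        (fun next_round p =>
          let next_max := p.1
          let current_vals := p.2
          let next_next_max := if next_max == n - 1 then next_max else next_max + 1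
          (PySem.List.pyRange 0 (1 + next_max) 1).foldl
            (fun nr next_val =>
              nr ++ [(if next_val == next_max then next_next_max else next_max,
                      current_vals ++ [next_val])])
            next_round)
        init
      = init ++ L.flatMap (msaChild n) := by
  intro L
  induction L with
  | nil => intro init; simp
  | cons p ps ih =>
      intro init
      simp only [List.foldl_cons, ih, List.flatMap_cons]
      rw [msa_foldl_append]
      simp [msaChild, List.append_assoc]

-- dfs with one more step of fuel expands into children
theorem msaDfs_succ (n : Int) (k : Nat) (p : Int × List Int) :
    msaDfs n ((k : Int) + 1) p.1 p.2
      = (msaChild n p).flatMap (fun q => msaDfs n (k : Int) q.1 q.2) := by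
  rw [msaDfs]
  have h : ¬ ((k : Int) + 1 ≤ 0) := by omega
  simp only [if_neg h, msaChild, List.flatMap_map]
  have : (k : Int) + 1 - 1 = (k : Int) := by omega
  rw [this]

-- iterating A's level step = flatMap of the DFS with fuel = number of iterations
theorem msa_levels_eq (n : Int) :
    ∀ (xs : List Int) (L : List (Int × List Int)),
      xs.foldl (fun acc (_ : Int) => acc.flatMap (msaChild n)) L
        = L.flatMap (fun p => msaDfs n (xs.length : Int) p.1 p.2) := by
  intro xs
  induction xs with
  | nil =>
      intro L
      simp only [List.foldl_nil, List.length_nil, Nat.cast_zero]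
      have : (fun p : Int × List Int => msaDfs n 0 p.1 p.2)
           = (fun p : Int × List Int => [p]) := by
        funext p; rw [msaDfs]; simp
      rw [this]
      simp
  | cons x xs ih =>
      intro L
      simp only [List.foldl_cons, ih, List.length_cons]
      rw [List.flatMap_assoc]
      have hc : ((xs.length + 1 : Nat) : Int) = (xs.length : Int) + 1 := by push_cast; ring
      rw [hc]
      congr 1
      funext p
      exact (msaDfs_succ n xs.length p).symm

-- fuel given as toNat agrees with the raw Int fuel
theorem msaDfs_toNat (n remaining cur_max : Int) (vals : List Int) :
    msaDfs n ((remaining.toNat : Nat) : Int) cur_max vals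
      = msaDfs n remaining cur_max vals := by
  by_cases h : remaining ≤ 0
  · have h0 : ((remaining.toNat : Nat) : Int) = 0 := by omega
    rw [h0, msaDfs, msaDfs]
    simp [h]
  · have h0 : ((remaining.toNat : Nat) : Int) = remaining := by omega
    rw [h0]

-- ===== VERDICT (by name: the statement is the Claim_ definition above) =====
theorem make_symmetric_assignment_spec : Claim_equal_make_symmetric_assignment := by
  intro num_slots n _
  unfold Spec_make_symmetric_assignment make_symmetric_assignment make_symmetric_assignment_alt
  have hstep :
      (fun (all_possibilities : List (Int × List Int)) (_slot : Int) =>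
        all_possibilities.foldl
          (fun next_round p =>
            let next_max := p.1
            let current_vals := p.2
            let next_next_max := if next_max == n - 1 then next_max else next_max + 1
            (PySem.List.pyRange 0 (1 + next_max) 1).foldl
              (fun nr next_val =>
                nr ++ [(if next_val == next_max then next_next_max else next_max,
                        current_vals ++ [next_val])])
              next_round)
          [])
      = (fun (acc : List (Int × List Int)) (_ : Int) => acc.flatMap (msaChild n)) := by
    funext acc _
    rw [msa_inner_eq]
    simp
  rw [hstep, msa_levels_eq]
  rw [PySem.List.length_pyRange_one]
  have hlen : ((num_slots - 0).toNat : Int) = ((num_slots.toNat : Nat) : Int) := by omega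
  rw [hlen]
  simp only [List.flatMap_cons, List.flatMap_nil, List.append_nil]
  exact msaDfs_toNat n num_slots 0 []
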